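-- pv_equiv track=rewrite | github.com/t-hiroishi/webvtt-py | webvtt/parsers.py | iter_blocks_of_lines
-- ===== SOURCE A (Python) =====
-- import typing
--
-- def iter_blocks_of_lines(lines) -> typing.Generator[typing.List[str], None, None]:
--     current_text_block = []
--
--     for line in lines:
--         if line.strip():
--             current_text_block.append(line)
--         elif current_text_block:
--             yield current_text_block
--             current_text_block = []
--
--     if current_text_block:
--         yield current_text_block
-- ===== SOURCE B (Python) =====
-- import itertools
-- import typing
--
--
-- def iter_blocks_of_lines(lines) -> typing.Generator[typing.List[str], None, None]:
--     for nonblank, group in itertools.groupby(lines, key=lambda line: bool(line.strip())):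
--         if nonblank:
--             yield list(group)
-- ===== Notes on version B (the rewrite author's own statement) =====
-- stated objective: idiomatic
-- what changed: Replaces the explicit accumulator with its end-of-loop flush by itertools.groupby keyed on blank/non-blank, yielding each True-keyed run directly.
import Mathlib
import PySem

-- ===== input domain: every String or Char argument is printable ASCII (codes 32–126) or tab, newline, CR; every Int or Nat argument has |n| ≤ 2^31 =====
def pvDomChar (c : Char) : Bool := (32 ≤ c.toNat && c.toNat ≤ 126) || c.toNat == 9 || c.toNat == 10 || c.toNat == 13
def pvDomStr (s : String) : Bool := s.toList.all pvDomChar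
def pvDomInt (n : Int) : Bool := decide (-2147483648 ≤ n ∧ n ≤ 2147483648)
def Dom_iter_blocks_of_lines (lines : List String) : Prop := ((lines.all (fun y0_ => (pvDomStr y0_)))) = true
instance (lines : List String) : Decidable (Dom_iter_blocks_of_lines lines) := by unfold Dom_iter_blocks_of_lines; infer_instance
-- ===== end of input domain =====

-- B replaces A's explicit accumulator and end-of-loop flush by an itertools.groupby-style
-- grouping into maximal blank/non-blank runs, emitting the non-blank runs (idiomatic).

-- ===== PORT A =====
-- accumulator loop: (yielded blocks so far, current_text_block)
def iter_blocks_of_lines (lines : List String) : List (List String) :=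
  let s := lines.foldl
    (fun (s : List (List String) × List String) line =>
      if PySem.Str.strip line ≠ "" then (s.1, s.2 ++ [line])
      else if s.2 ≠ [] then (s.1 ++ [s.2], [])
      else s)
    ([], [])
  if s.2 ≠ [] then s.1 ++ [s.2] else s.1

-- ===== PORT B =====
-- the groupby key: bool(line.strip())
def pvNonBlank (line : String) : Bool := PySem.Str.strip line ≠ ""

-- itertools.groupby(lines, key=pvNonBlank), keeping only the True-keyed groups:
-- each maximal non-blank run is one output block, blank runs are skipped.
def iter_blocks_of_lines_alt : List String → List (List String)
  | [] => []
  | l :: ls =>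
    if pvNonBlank l then
      (l :: ls.takeWhile pvNonBlank) :: iter_blocks_of_lines_alt (ls.dropWhile pvNonBlank)
    else
      iter_blocks_of_lines_alt ls
termination_by ls => ls.length
decreasing_by
  · exact Nat.lt_succ_of_le (ls.length_dropWhile_le pvNonBlank)
  · exact Nat.lt_succ_self _

-- ===== PRECONDITION & SPEC =====
def Spec_iter_blocks_of_lines (lines : List String) (out : List (List String)) : Prop := out = iter_blocks_of_lines_alt lines
instance (lines : List String) (out : List (List String)) : Decidable (Spec_iter_blocks_of_lines lines out) := by unfold Spec_iter_blocks_of_lines; infer_instance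

-- ===== CLAIM (what is proved, stated in full; the proofs are below) =====
def Claim_equal_iter_blocks_of_lines : Prop := ∀ (lines : List String), Dom_iter_blocks_of_lines lines → Spec_iter_blocks_of_lines lines (iter_blocks_of_lines lines)

-- ===== LEMMAS AND PROOFS =====

-- A's loop body and flush, as a recursive function over (current_text_block, remaining lines)
def pvGo (cur : List String) : List String → List (List String)
  | [] => if cur ≠ [] then [cur] else []
  | l :: ls =>
    if PySem.Str.strip l ≠ "" then pvGo (cur ++ [l]) ls
    else if cur ≠ [] then cur :: pvGo [] ls
    else pvGo [] ls

-- A's fold-then-flush from any state (out, cur) is out ++ pvGo cur rest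
theorem pvGo_foldl (rest : List String) : ∀ (out : List (List String)) (cur : List String),
    (let s := rest.foldl
      (fun (s : List (List String) × List String) line =>
        if PySem.Str.strip line ≠ "" then (s.1, s.2 ++ [line])
        else if s.2 ≠ [] then (s.1 ++ [s.2], [])
        else s) (out, cur)
     if s.2 ≠ [] then s.1 ++ [s.2] else s.1) = out ++ pvGo cur rest := by
  induction rest with
  | nil =>
    intro out cur
    simp only [List.foldl_nil, pvGo]
    split <;> simp
  | cons l ls ih =>
    intro out cur
    simp only [List.foldl_cons]
    by_cases h : PySem.Str.strip l ≠ ""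
    · rw [if_pos h, ih out (cur ++ [l])]
      simp only [pvGo, if_pos h]
    · rw [if_neg h]
      by_cases hc : cur ≠ []
      · rw [if_pos hc, ih (out ++ [cur]) []]
        simp only [pvGo, if_neg h, if_pos hc, List.append_assoc, List.singleton_append]
      · rw [if_neg hc, ih out cur]
        have hcur : cur = [] := not_not.mp hc
        subst hcur
        simp only [pvGo, if_neg h, if_neg hc]

-- pvGo with any pending block equals B's grouping
theorem pvGo_eq_alt (ls : List String) : ∀ (cur : List String),
    pvGo cur ls =
      if cur = [] then iter_blocks_of_lines_alt ls
      else (cur ++ ls.takeWhile pvNonBlank) :: iter_blocks_of_lines_alt (ls.dropWhile pvNonBlank) := by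
  induction ls with
  | nil =>
    intro cur
    simp only [pvGo, List.takeWhile_nil, List.dropWhile_nil, iter_blocks_of_lines_alt]
    split <;> simp_all
  | cons l ls ih =>
    intro cur
    by_cases h : pvNonBlank l
    · have hs : PySem.Str.strip l ≠ "" := by simpa [pvNonBlank] using h
      simp only [pvGo, if_pos hs, ih (cur ++ [l]),
        if_neg (by simp : ¬ (cur ++ [l] = [])),
        iter_blocks_of_lines_alt, if_pos h, List.takeWhile_cons_of_pos h,
        List.dropWhile_cons_of_pos h]
      split <;> simp_all
    · have hs : ¬ PySem.Str.strip l ≠ "" := by simpa [pvNonBlank] using h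
      simp only [pvGo, if_neg hs, iter_blocks_of_lines_alt, if_neg h,
        List.takeWhile_cons_of_neg (by simpa using h),
        List.dropWhile_cons_of_neg (by simpa using h)]
      by_cases hc : cur ≠ []
      · rw [if_pos hc, ih [], if_pos rfl, if_neg (not_not.mp (not_not_intro hc))]
        simp
      · rw [if_neg hc, ih [], if_pos rfl, if_pos (not_not.mp hc)]

-- ===== VERDICT (by name: the statement is the Claim_ definition above) =====
theorem iter_blocks_of_lines_spec : Claim_equal_iter_blocks_of_lines := by
  intro lines _
  unfold Spec_iter_blocks_of_lines iter_blocks_of_lines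
  rw [pvGo_foldl lines [] [], pvGo_eq_alt lines [], if_pos rfl]
  simp
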